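-- pv_equiv track=rewrite | github.com/kazemnejad/pt_hf_base | scripts/generate_addition.py | generate_scratchpad
-- ===== SOURCE A (Python) =====
-- def split_digits(a):
--     # introduce space between digits so that they are tokenized separately
--     if type(a) == int:
--         return " ".join(list(str(a)))
--     elif type(a) == str:
--         return " ".join(list(a))
--
-- def generate_scratchpad(a, b):
--     # use the gradeschool carry method
--     x = str(a)
--     y = str(b)
--     scratchpad = ["<scratch>"]
--     # scratchpad = ["scratch"]
--     scratchpad.append(" ".join([split_digits(a), "+", split_digits(b), ",", "C:", "0"]))
--
--     # pad numbers as necessary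
--     max_len = max(len(x), len(y))
--     x = x.zfill(max_len)
--     y = y.zfill(max_len)
--
--     carry = 0
--     result = [""] * len(str(a + b))
--     for i in range(max_len - 1, -1, -1):
--         digit_sum = int(x[i]) + int(y[i]) + carry
--         carry = 0 if digit_sum < 10 else 1
--         result[i] = str(digit_sum)[-1]
--         if i > 0:
--             scratchpad.append(
--                 " ".join(
--                     [
--                         split_digits(x[:i]),
--                         "+",
--                         split_digits(y[:i]),
--                         ",",
--                         *result[i:],
--                         "C:",
--                         str(carry),
--                     ]
--                 )
--             )
--         else:
--             scratchpad.append(" ".join([",", *result, "C:", str(carry)]))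
--     scratchpad.append("</scratch>")
--     # scratchpad.append("answer")
--
--     input = " ".join(
--         [split_digits(a), "+", split_digits(b)]
--     )  # make sure we don't put the padding in the input
--     final_num = " ".join([str(carry), *result])
--     # scratchpad.append(final_num)
--     answer = final_num if carry == 1 else final_num[1:]
--     # target = [*scratchpad, answer]
--
--     # assert int(final_num.replace(" ", "")) == a + b
--
--     return input, answer, scratchpad
-- ===== SOURCE B (Python) =====
-- def _spread(s):
--     # space-separate the characters of a string (same job as split_digits on str)
--     return " ".join(list(s))
--
--
-- def generate_scratchpad(a, b):
--     # Two-pass rewrite: pass 1 computes all sum digits and carries right-to-left;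
--     # pass 2 formats the scratchpad lines from the completed arrays.
--     x = str(a)
--     y = str(b)
--     n = max(len(x), len(y))
--     xp = x.zfill(n)
--     yp = y.zfill(n)
--
--     # pass 1: digits and carry-after for every padded position
--     digits = []
--     carries = []
--     c = 0
--     for i in range(n - 1, -1, -1):
--         s = int(xp[i]) + int(yp[i]) + c
--         c = 1 if s >= 10 else 0
--         digits.append(str(s % 10))
--         carries.append(c)
--     digits.reverse()
--     carries.reverse()
--
--     # the original result list is len(str(a+b)) long; any extra tail cells stay ""
--     result = digits + [""] * (len(str(a + b)) - n)
--
--     # pass 2: format the lines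
--     lines = ["<scratch>", " ".join([_spread(x), "+", _spread(y), ",", "C:", "0"])]
--     for i in range(n - 1, 0, -1):
--         lines.append(
--             " ".join(
--                 [_spread(xp[:i]), "+", _spread(yp[:i]), ","]
--                 + result[i:]
--                 + ["C:", str(carries[i])]
--             )
--         )
--     lines.append(" ".join([","] + result + ["C:", str(c)]))
--     lines.append("</scratch>")
--
--     input = " ".join([_spread(x), "+", _spread(y)])
--     final_num = " ".join([str(c)] + result)
--     answer = final_num if c == 1 else final_num[1:]
--     return input, answer, lines
-- ===== Notes on version B (the rewrite author's own statement) =====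
-- stated objective: alternative
-- what changed: A's single fused right-to-left loop that formats each scratchpad line from a partially filled result list is split into two passes: pass 1 computes only the sum digits and per-position carries, pass 2 formats all lines from the completed arrays.
import Mathlib
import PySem

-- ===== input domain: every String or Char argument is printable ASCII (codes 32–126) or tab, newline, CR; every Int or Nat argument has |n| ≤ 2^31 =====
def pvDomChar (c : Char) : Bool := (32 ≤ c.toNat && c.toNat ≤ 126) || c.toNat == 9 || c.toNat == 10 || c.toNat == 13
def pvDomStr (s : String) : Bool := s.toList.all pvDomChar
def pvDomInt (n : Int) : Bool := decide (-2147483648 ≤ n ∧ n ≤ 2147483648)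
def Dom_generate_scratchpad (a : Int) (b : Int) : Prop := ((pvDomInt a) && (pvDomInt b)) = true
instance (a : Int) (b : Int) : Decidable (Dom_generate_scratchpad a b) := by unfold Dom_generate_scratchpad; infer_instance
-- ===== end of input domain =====

-- B replaces A's single fused loop (which formats each scratchpad line from a partially
-- filled result list) by two passes: pass 1 computes all sum digits and carries, pass 2
-- formats the lines from the completed arrays; objective: alternative decomposition, not speed.

-- shared primitive wrappers (both Pythons do " ".join(...) and int(<one char>) the same way)
-- " ".join(list(s))  (split_digits in A, _spread in B)
def pvSpread (cs : List Char) : List Char := PySem.Chars.join [' '] (cs.map (fun c => [c]))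
-- " ".join(words)
def pvJoinW (ws : List (List Char)) : List Char := PySem.Chars.join [' '] ws
-- int(s[i]) for the in-range indices both loops use ('0' default is never hit inside Pre_)
def pvDig (cs : List Char) (i : Nat) : Int := (PySem.Int.ofChars? [cs.getD i '0']).getD 0

-- ===== PORT A =====
-- str(digit_sum)[-1]
def pvLastChar (n : Int) : Char := (PySem.List.pyGet? (PySem.Int.toChars n) (-1)).getD '0'

-- the fused `for i in range(max_len-1, -1, -1)` loop: state = (carry, result, scratchpad)
def pvLoopA (x y : List Char) : Nat → Int → List (List Char) → List (List Char) →
    Int × List (List Char) × List (List Char)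
  | 0, carry, result, scratch =>
      let ds := pvDig x 0 + pvDig y 0 + carry
      let c' : Int := if ds < 10 then 0 else 1
      let r' := result.set 0 [pvLastChar ds]
      (c', r', scratch ++ [pvJoinW ([[',']] ++ r' ++ [['C', ':'], PySem.Int.toChars c'])])
  | j+1, carry, result, scratch =>
      let ds := pvDig x (j+1) + pvDig y (j+1) + carry
      let c' : Int := if ds < 10 then 0 else 1
      let r' := result.set (j+1) [pvLastChar ds]
      pvLoopA x y j c' r'
        (scratch ++ [pvJoinW ([pvSpread (x.take (j+1)), ['+'], pvSpread (y.take (j+1)), [',']]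
          ++ r'.drop (j+1) ++ [['C', ':'], PySem.Int.toChars c'])])

def generate_scratchpad (a : Int) (b : Int) : String × String × List String :=
  let x := PySem.Int.toChars a
  let y := PySem.Int.toChars b
  let scratch0 : List (List Char) :=
    ["<scratch>".toList, pvJoinW [pvSpread x, ['+'], pvSpread y, [','], ['C', ':'], ['0']]]
  let maxLen := max x.length y.length
  let xp := PySem.Chars.zfill x (maxLen : Int)
  let yp := PySem.Chars.zfill y (maxLen : Int)
  -- result = [""] * len(str(a + b)); carry = 0
  let r0 : List (List Char) := List.replicate (PySem.Int.toChars (a + b)).length []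
  let res := pvLoopA xp yp (maxLen - 1) 0 r0 scratch0
  let scratch := res.2.2 ++ ["</scratch>".toList]
  let inp := pvJoinW [pvSpread x, ['+'], pvSpread y]
  let finalNum := pvJoinW ([PySem.Int.toChars res.1] ++ res.2.1)
  -- final_num[1:] on a nonneg slice is List.drop 1 (exact)
  let answer := if res.1 == 1 then finalNum else finalNum.drop 1
  (String.ofList inp, String.ofList answer, scratch.map String.ofList)

-- ===== PORT B =====
-- pass 1: `for i in range(n-1, -1, -1)` accumulating digits.append / carries.append
def pvLoopB1 (x y : List Char) : Nat → Int → List (List Char) → List Int →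
    Int × List (List Char) × List Int
  | 0, c, ds, cs =>
      let s := pvDig x 0 + pvDig y 0 + c
      let c' : Int := if 10 ≤ s then 1 else 0
      (c', ds ++ [PySem.Int.toChars (PySem.Int.mod s 10)], cs ++ [c'])
  | j+1, c, ds, cs =>
      let s := pvDig x (j+1) + pvDig y (j+1) + c
      let c' : Int := if 10 ≤ s then 1 else 0
      pvLoopB1 x y j c' (ds ++ [PySem.Int.toChars (PySem.Int.mod s 10)]) (cs ++ [c'])

-- one formatted line of pass 2
def pvLineB (xp yp : List Char) (result : List (List Char)) (carries : List Int) (i : Nat) : List Char :=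
  pvJoinW ([pvSpread (xp.take i), ['+'], pvSpread (yp.take i), [',']]
    ++ result.drop i ++ [['C', ':'], PySem.Int.toChars (carries.getD i 0)])

-- pass 2: `for i in range(n-1, 0, -1)`
def pvLoopB2 (xp yp : List Char) (result : List (List Char)) (carries : List Int) : Nat → List (List Char)
  | 0 => []
  | j+1 => pvLineB xp yp result carries (j+1) :: pvLoopB2 xp yp result carries j

def generate_scratchpad_alt (a : Int) (b : Int) : String × String × List String :=
  let x := PySem.Int.toChars a
  let y := PySem.Int.toChars b
  let n := max x.length y.length
  let xp := PySem.Chars.zfill x (n : Int)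
  let yp := PySem.Chars.zfill y (n : Int)
  let p1 := pvLoopB1 xp yp (n - 1) 0 [] []
  let c := p1.1
  let digits := p1.2.1.reverse
  let carries := p1.2.2.reverse
  -- digits + [""] * (len(str(a+b)) - n): truncated subtraction matches Python's empty repeat
  let result := digits ++ List.replicate ((PySem.Int.toChars (a + b)).length - n) []
  let lines := ["<scratch>".toList, pvJoinW [pvSpread x, ['+'], pvSpread y, [','], ['C', ':'], ['0']]]
      ++ pvLoopB2 xp yp result carries (n - 1)
      ++ [pvJoinW ([[',']] ++ result ++ [['C', ':'], PySem.Int.toChars c])]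
      ++ ["</scratch>".toList]
  let inp := pvJoinW [pvSpread x, ['+'], pvSpread y]
  let finalNum := pvJoinW ([PySem.Int.toChars c] ++ result)
  let answer := if c == 1 then finalNum else finalNum.drop 1
  (String.ofList inp, String.ofList answer, lines.map String.ofList)

-- ===== PRECONDITION & SPEC =====
-- Pre_ excludes exactly the inputs where A raises: any negative argument makes
-- int() hit the '-' sign character (ValueError) or the result-list assignment
-- overrun (IndexError); A returns normally on all a, b ≥ 0.
def Pre_generate_scratchpad (a : Int) (b : Int) : Prop := 0 ≤ a ∧ 0 ≤ b
instance (a : Int) (b : Int) : Decidable (Pre_generate_scratchpad a b) := by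
  unfold Pre_generate_scratchpad; infer_instance
def pvWitness_generate_scratchpad : Int × Int := (17, 25)

def Spec_generate_scratchpad (a : Int) (b : Int) (out : String × String × List String) : Prop :=
  out = generate_scratchpad_alt a b
instance (a : Int) (b : Int) (out : String × String × List String) :
    Decidable (Spec_generate_scratchpad a b out) := by unfold Spec_generate_scratchpad; infer_instance

-- ===== CLAIM (what is proved, stated in full; the proofs are below) =====
def Claim_equal_generate_scratchpad : Prop := ∀ (a : Int) (b : Int), Dom_generate_scratchpad a b →
  Pre_generate_scratchpad a b → Spec_generate_scratchpad a b (generate_scratchpad a b)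

-- ===== LEMMAS AND PROOFS =====

-- every digit char is one of the ten literals
lemma pv_digit_mem (c : Char) (h : c.isDigit = true) :
    c ∈ ['0','1','2','3','4','5','6','7','8','9'] := by
  simp [Char.isDigit] at h
  obtain ⟨h1, h2⟩ := h
  have h1' : 48 ≤ c.val.toNat := by exact_mod_cast UInt32.le_iff_toNat_le.mp h1
  have h2' : c.val.toNat ≤ 57 := by exact_mod_cast UInt32.le_iff_toNat_le.mp h2
  have hk : c.val.toNat = 48 ∨ c.val.toNat = 49 ∨ c.val.toNat = 50 ∨ c.val.toNat = 51 ∨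
      c.val.toNat = 52 ∨ c.val.toNat = 53 ∨ c.val.toNat = 54 ∨ c.val.toNat = 55 ∨
      c.val.toNat = 56 ∨ c.val.toNat = 57 := by omega
  have key : ∀ (d : Char), c.val.toNat = d.val.toNat → c = d := by
    intro d hd; exact Char.ext (UInt32.toNat_inj.mp hd)
  rcases hk with h|h|h|h|h|h|h|h|h|h
  · simp [key '0' (by rw [h]; rfl)]
  · simp [key '1' (by rw [h]; rfl)]
  · simp [key '2' (by rw [h]; rfl)]
  · simp [key '3' (by rw [h]; rfl)]
  · simp [key '4' (by rw [h]; rfl)]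
  · simp [key '5' (by rw [h]; rfl)]
  · simp [key '6' (by rw [h]; rfl)]
  · simp [key '7' (by rw [h]; rfl)]
  · simp [key '8' (by rw [h]; rfl)]
  · simp [key '9' (by rw [h]; rfl)]

-- int(<digit char>) is between 0 and 9
lemma pv_ofChars_digit_bounds (c : Char) (h : c.isDigit = true) :
    0 ≤ (PySem.Int.ofChars? [c]).getD 0 ∧ (PySem.Int.ofChars? [c]).getD 0 ≤ 9 := by
  have hm := pv_digit_mem c h
  fin_cases hm <;> decide

lemma pv_pvDig_bounds (cs : List Char) (hcs : ∀ c ∈ cs, c.isDigit = true) (i : Nat) :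
    0 ≤ pvDig cs i ∧ pvDig cs i ≤ 9 := by
  unfold pvDig
  apply pv_ofChars_digit_bounds
  by_cases hi : i < cs.length
  · rw [List.getD_eq_getElem cs '0' hi]
    exact hcs _ (List.getElem_mem hi)
  · rw [List.getD_eq_default cs '0' (by omega)]; decide

-- str(s)[-1] and str(s % 10) pick the same (single) digit for the sums the loop can see
lemma pv_last_digit (s : Int) (h0 : 0 ≤ s) (h1 : s ≤ 19) :
    [pvLastChar s] = PySem.Int.toChars (PySem.Int.mod s 10) := by
  unfold pvLastChar
  interval_cases s <;> decide

-- both carry expressions agree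
lemma pv_carry_eq (ds : Int) : (if ds < 10 then (0:Int) else 1) = (if 10 ≤ ds then 1 else 0) := by
  split_ifs <;> omega

-- pass 1 accumulators only grow on the right
lemma pvLoopB1_acc (x y : List Char) : ∀ (i : Nat) (c : Int) (ds : List (List Char)) (cs : List Int),
    pvLoopB1 x y i c ds cs = ((pvLoopB1 x y i c [] []).1,
      ds ++ (pvLoopB1 x y i c [] []).2.1, cs ++ (pvLoopB1 x y i c [] []).2.2) := by
  intro i
  induction i with
  | zero => intro c ds cs; simp [pvLoopB1]
  | succ j ih =>
    intro c ds cs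
    rw [pvLoopB1, pvLoopB1]
    simp only [List.nil_append]
    set c' : Int := if 10 ≤ pvDig x (j + 1) + pvDig y (j + 1) + c then 1 else 0 with hc'
    set d : List Char := PySem.Int.toChars (PySem.Int.mod (pvDig x (j+1) + pvDig y (j+1) + c) 10) with hd
    rw [ih c' (ds ++ [d]) (cs ++ [c']), ih c' [d] [c']]
    simp

lemma pvLoopB1_len (x y : List Char) : ∀ (i : Nat) (c : Int),
    (pvLoopB1 x y i c [] []).2.1.length = i + 1 ∧ (pvLoopB1 x y i c [] []).2.2.length = i + 1 := by
  intro i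
  induction i with
  | zero => intro c; simp [pvLoopB1]
  | succ j ih =>
    intro c
    rw [pvLoopB1, pvLoopB1_acc]
    simp [ih]

-- pass 2 only reads carries below the write index
lemma pvLoopB2_snoc (x y : List Char) (R : List (List Char)) :
    ∀ (j : Nat) (cs : List Int) (e : Int), j < cs.length →
    pvLoopB2 x y R (cs ++ [e]) j = pvLoopB2 x y R cs j := by
  intro j
  induction j with
  | zero => intro cs e h; rfl
  | succ k ih =>
    intro cs e h
    rw [pvLoopB2, pvLoopB2, ih cs e (by omega)]
    unfold pvLineB
    rw [List.getD_append _ _ _ _ (by omega)]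

lemma pv_drop_set (l : List (List Char)) (k : Nat) (v : List Char) (h : k < l.length) :
    (l.set k v).drop k = v :: l.drop (k+1) := by
  rw [List.set_eq_take_cons_drop v h]
  exact List.drop_left' (by simp; omega)

-- MAIN INVARIANT: the fused loop of A equals B's two passes, from any level i downwards
lemma pvLoopA_eq (x y : List Char) (hx : ∀ c ∈ x, c.isDigit = true) (hy : ∀ c ∈ y, c.isDigit = true) :
    ∀ (i : Nat) (c : Int) (res scr : List (List Char)), i < res.length → 0 ≤ c → c ≤ 1 →
    pvLoopA x y i c res scr =
      ((pvLoopB1 x y i c [] []).1,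
       (pvLoopB1 x y i c [] []).2.1.reverse ++ res.drop (i+1),
       scr ++ pvLoopB2 x y ((pvLoopB1 x y i c [] []).2.1.reverse ++ res.drop (i+1))
                ((pvLoopB1 x y i c [] []).2.2.reverse) i
           ++ [pvJoinW ([[',']] ++ ((pvLoopB1 x y i c [] []).2.1.reverse ++ res.drop (i+1))
                ++ [['C', ':'], PySem.Int.toChars (pvLoopB1 x y i c [] []).1])]) := by
  intro i
  induction i with
  | zero =>
    intro c res scr hres hc0 hc1
    obtain ⟨hdx0, hdx9⟩ := pv_pvDig_bounds x hx 0
    obtain ⟨hdy0, hdy9⟩ := pv_pvDig_bounds y hy 0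
    rw [pvLoopA, pvLoopB1]
    rw [pv_carry_eq, pv_last_digit (pvDig x 0 + pvDig y 0 + c) (by omega) (by omega),
        List.set_eq_take_cons_drop _ hres]
    simp [pvLoopB2]
  | succ j ih =>
    intro c res scr hres hc0 hc1
    obtain ⟨hdx0, hdx9⟩ := pv_pvDig_bounds x hx (j+1)
    obtain ⟨hdy0, hdy9⟩ := pv_pvDig_bounds y hy (j+1)
    rw [pvLoopA, pvLoopB1]
    simp only [List.nil_append]
    set s := pvDig x (j+1) + pvDig y (j+1) + c with hs
    set c' : Int := if 10 ≤ s then 1 else 0 with hc'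
    have hcc : (if s < 10 then (0:Int) else 1) = c' := pv_carry_eq s
    set d : List Char := PySem.Int.toChars (PySem.Int.mod s 10) with hd
    have hdl : [pvLastChar s] = d := pv_last_digit s (by omega) (by omega)
    rw [hcc, hdl]
    have hset : (res.set (j+1) d).length = res.length := by simp
    rw [ih c' (res.set (j+1) d) _ (by omega) (by simp [hc']; split_ifs <;> omega)
        (by simp [hc']; split_ifs <;> omega)]
    rw [pvLoopB1_acc x y j c' [d] [c']]
    have hlen := pvLoopB1_len x y j c'
    set F := pvLoopB1 x y j c' [] [] with hF
    have hds : (res.set (j+1) d).drop (j+1) = d :: res.drop (j+2) := pv_drop_set res (j+1) d hres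
    have hlr : (F.2.1.reverse).length = j + 1 := by simp [hlen.1]
    dsimp only
    simp only [List.reverse_append, List.reverse_singleton]
    rw [hds, pvLoopB2]
    rw [pvLoopB2_snoc x y _ j F.2.2.reverse c' (by simp [hlen.2])]
    have h1 : List.drop (j+1) ((F.2.1.reverse ++ [d]) ++ List.drop (j+1+1) res)
        = d :: List.drop (j+1+1) res := by
      rw [List.append_assoc, List.drop_left' hlr]
      rfl
    have h2 : (F.2.2.reverse ++ [c']).getD (j+1) 0 = c' := by
      rw [List.getD_append_right _ _ _ _ (by simp [hlen.2])]
      simp [hlen.2]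
    unfold pvLineB
    rw [h1, h2]
    simp

-- str(n) of a nonnegative int is all digit chars
lemma pv_dchar_digit (d : Nat) (h : d < 10) : (Nat.digitChar d).isDigit = true := by
  interval_cases d <;> decide

lemma pv_tdc_digits : ∀ (f n : Nat) (acc : List Char), (∀ c ∈ acc, c.isDigit = true) →
    ∀ c ∈ Nat.toDigitsCore 10 f n acc, c.isDigit = true := by
  intro f
  induction f with
  | zero => intro n acc hacc; simpa [Nat.toDigitsCore] using hacc
  | succ f ih =>
    intro n acc hacc c hc
    simp only [Nat.toDigitsCore] at hc
    split at hc
    · rcases List.mem_cons.mp hc with h | h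
      · subst h; exact pv_dchar_digit _ (Nat.mod_lt _ (by norm_num))
      · exact hacc _ h
    · exact ih _ _ (by
        intro c' hc'
        rcases List.mem_cons.mp hc' with h | h
        · subst h; exact pv_dchar_digit _ (Nat.mod_lt _ (by norm_num))
        · exact hacc _ h) _ hc

lemma pv_toChars_digits (a : Int) (ha : 0 ≤ a) : ∀ c ∈ PySem.Int.toChars a, c.isDigit = true := by
  unfold PySem.Int.toChars
  rw [if_neg (by omega)]
  exact pv_tdc_digits _ _ [] (by simp)

lemma pv_zfill_digits (cs : List Char) (hcs : ∀ c ∈ cs, c.isDigit = true) (w : Int) :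
    ∀ c ∈ PySem.Chars.zfill cs w, c.isDigit = true := by
  unfold PySem.Chars.zfill
  split
  · exact hcs
  · match cs with
    | [] => dsimp only; intro c hc; rw [List.eq_of_mem_replicate hc]; decide
    | c0 :: rest =>
      have h0 : c0.isDigit = true := hcs c0 (by simp)
      dsimp only
      rw [if_neg (by
        rintro (h | h) <;> subst h <;> simp [Char.isDigit] at h0)]
      intro c hc
      rcases List.mem_append.mp hc with h | h
      · rw [List.eq_of_mem_replicate h]; decide
      · exact hcs _ h

-- length of str(n) for nonneg n is log10 + 1, hence monotone
lemma pv_tdc_len : ∀ (f n : Nat), n < f → (Nat.toDigitsCore 10 f n []).length = Nat.log 10 n + 1 := by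
  intro f
  induction f with
  | zero => omega
  | succ f ih =>
    intro n hn
    simp only [Nat.toDigitsCore]
    split
    · next h =>
      have hlt : n < 10 := by
        have := Nat.div_eq_zero_iff.mp h
        omega
      simp [Nat.log_eq_zero_iff.mpr (Or.inl hlt)]
    · next h =>
      rw [Nat.toDigitsCore_lens_eq, ih (n / 10) (by omega)]
      have h10 : 10 ≤ n := by
        rcases Nat.lt_or_ge n 10 with h' | h'
        · exact absurd (Nat.div_eq_of_lt h') h
        · exact h'
      have := Nat.log_div_base 10 n
      have hpos := Nat.log_pos (by norm_num : 1 < 10) h10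
      omega

lemma pv_toChars_len (a : Int) (ha : 0 ≤ a) :
    (PySem.Int.toChars a).length = Nat.log 10 a.toNat + 1 := by
  unfold PySem.Int.toChars
  rw [if_neg (by omega)]
  exact pv_tdc_len _ _ (by omega)

lemma pv_toChars_len_mono (a b : Int) (ha : 0 ≤ a) (hab : a ≤ b) :
    (PySem.Int.toChars a).length ≤ (PySem.Int.toChars b).length := by
  rw [pv_toChars_len a ha, pv_toChars_len b (by omega)]
  have : a.toNat ≤ b.toNat := by omega
  have := Nat.log_mono_right (b := 10) this
  omega

-- ===== VERDICT (by name: the statement is the Claim_ definition above) =====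
theorem generate_scratchpad_spec : Claim_equal_generate_scratchpad := by
  intro a b _hDom hPre
  obtain ⟨ha, hb⟩ := hPre
  unfold Spec_generate_scratchpad generate_scratchpad generate_scratchpad_alt
  dsimp only
  set x := PySem.Int.toChars a with hxdef
  set y := PySem.Int.toChars b with hydef
  set n := max x.length y.length with hn
  set xp := PySem.Chars.zfill x (n : Int) with hxp
  set yp := PySem.Chars.zfill y (n : Int) with hyp
  set m := (PySem.Int.toChars (a + b)).length with hm
  have hxdig : ∀ c ∈ xp, c.isDigit = true := pv_zfill_digits x (pv_toChars_digits a ha) _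
  have hydig : ∀ c ∈ yp, c.isDigit = true := pv_zfill_digits y (pv_toChars_digits b hb) _
  have hxlen : 0 < x.length := by rw [hxdef, pv_toChars_len a ha]; omega
  have hnm : n ≤ m := by
    rw [hn, hm]
    apply max_le
    · exact pv_toChars_len_mono a (a + b) ha (by omega)
    · exact pv_toChars_len_mono b (a + b) hb (by omega)
  have hn1 : 1 ≤ n := by rw [hn]; omega
  have hi : n - 1 < (List.replicate m ([] : List Char)).length := by
    rw [List.length_replicate]; omega
  rw [pvLoopA_eq xp yp hxdig hydig (n - 1) 0 _ _ hi (by omega) (by omega)]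
  have hsub : n - 1 + 1 = n := by omega
  rw [hsub, List.drop_replicate]
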